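-- pv_equiv track=rewrite | github.com/chenla/hoard | src/hord/import_cards.py | _guess_type_from_tags
-- ===== SOURCE A (Python) =====
-- def _guess_type_from_tags(tags: list) -> str:
--     """Try to infer hord entity type from tags."""
--     tag_set = {t.lower() for t in tags}
--     if tag_set & {"person", "people", "bio", "biography"}:
--         return "wh:per"
--     if tag_set & {"book", "paper", "article", "work", "reference"}:
--         return "wh:wrk"
--     if tag_set & {"place", "location", "city", "country"}:
--         return "wh:pla"
--     if tag_set & {"event", "meeting", "conference"}:
--         return "wh:event"
--     if tag_set & {"project", "system"}:
--         return "wh:sys"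
--     if tag_set & {"org", "organization", "company", "institution"}:
--         return "wh:org"
--     return "wh:con"
-- ===== SOURCE B (Python) =====
-- _TYPE_BY_KEYWORD = {
--     **{k: (0, "wh:per") for k in ("person", "people", "bio", "biography")},
--     **{k: (1, "wh:wrk") for k in ("book", "paper", "article", "work", "reference")},
--     **{k: (2, "wh:pla") for k in ("place", "location", "city", "country")},
--     **{k: (3, "wh:event") for k in ("event", "meeting", "conference")},
--     **{k: (4, "wh:sys") for k in ("project", "system")},
--     **{k: (5, "wh:org") for k in ("org", "organization", "company", "institution")},
-- }
--
--
-- def _guess_type_from_tags(tags: list) -> str: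
--     """Try to infer hord entity type from tags."""
--     best = None
--     for t in tags:
--         hit = _TYPE_BY_KEYWORD.get(t.lower())
--         if hit is not None and (best is None or hit[0] < best[0]):
--             best = hit
--     return best[1] if best is not None else "wh:con"
-- ===== Notes on version B (the rewrite author's own statement) =====
-- stated objective: alternative
-- what changed: Replaced the six sequential set-intersection checks by one keyword-to-(priority,type) table and a single min-rank-tracking pass over the tags.
import Mathlib
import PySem

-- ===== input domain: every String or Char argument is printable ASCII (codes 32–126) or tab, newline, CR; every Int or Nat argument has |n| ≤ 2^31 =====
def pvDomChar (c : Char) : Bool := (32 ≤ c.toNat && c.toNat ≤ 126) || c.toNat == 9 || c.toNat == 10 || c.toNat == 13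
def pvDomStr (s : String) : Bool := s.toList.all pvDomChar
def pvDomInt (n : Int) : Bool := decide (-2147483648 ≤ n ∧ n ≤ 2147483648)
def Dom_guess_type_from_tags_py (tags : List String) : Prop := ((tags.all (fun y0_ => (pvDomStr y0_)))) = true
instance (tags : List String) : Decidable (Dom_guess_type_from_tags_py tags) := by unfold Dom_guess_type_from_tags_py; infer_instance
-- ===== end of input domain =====

-- B replaces A's six sequential set-intersections by a keyword→(priority,type) table and one
-- min-rank-tracking pass over the tags (alternative decomposition, same behaviour).

-- ===== PORT A =====
def guess_type_from_tags_py (tags : List String) : String :=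
  let tag_set : PySem.Set String := PySem.Set.ofList (tags.map (fun t => PySem.Str.lower t))
  if PySem.Set.inter tag_set ["person", "people", "bio", "biography"] ≠ [] then "wh:per"
  else if PySem.Set.inter tag_set ["book", "paper", "article", "work", "reference"] ≠ [] then "wh:wrk"
  else if PySem.Set.inter tag_set ["place", "location", "city", "country"] ≠ [] then "wh:pla"
  else if PySem.Set.inter tag_set ["event", "meeting", "conference"] ≠ [] then "wh:event"
  else if PySem.Set.inter tag_set ["project", "system"] ≠ [] then "wh:sys"
  else if PySem.Set.inter tag_set ["org", "organization", "company", "institution"] ≠ [] then "wh:org"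
  else "wh:con"

-- ===== PORT B =====
-- the module-level dict _TYPE_BY_KEYWORD from Source B
def pvTypeByKeyword : PySem.Dict String (Nat × String) := PySem.Dict.mk
  [("person", (0, "wh:per")), ("people", (0, "wh:per")), ("bio", (0, "wh:per")), ("biography", (0, "wh:per")),
   ("book", (1, "wh:wrk")), ("paper", (1, "wh:wrk")), ("article", (1, "wh:wrk")), ("work", (1, "wh:wrk")), ("reference", (1, "wh:wrk")),
   ("place", (2, "wh:pla")), ("location", (2, "wh:pla")), ("city", (2, "wh:pla")), ("country", (2, "wh:pla")),
   ("event", (3, "wh:event")), ("meeting", (3, "wh:event")), ("conference", (3, "wh:event")),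
   ("project", (4, "wh:sys")), ("system", (4, "wh:sys")),
   ("org", (5, "wh:org")), ("organization", (5, "wh:org")), ("company", (5, "wh:org")), ("institution", (5, "wh:org"))]

def guess_type_from_tags_py_alt (tags : List String) : String :=
  let best := tags.foldl (fun best t =>
    match PySem.Dict.get? pvTypeByKeyword (PySem.Str.lower t) with
    | none => best
    | some hit =>
      match best with
      | none => some hit
      | some b => if hit.1 < b.1 then some hit else some b) (none : Option (Nat × String))
  match best with
  | some b => b.2
  | none => "wh:con"

-- ===== PRECONDITION & SPEC =====
def Spec_guess_type_from_tags_py (tags : List String) (out : String) : Prop := out = guess_type_from_tags_py_alt tags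
instance (tags : List String) (out : String) : Decidable (Spec_guess_type_from_tags_py tags out) := by unfold Spec_guess_type_from_tags_py; infer_instance

-- ===== CLAIM (what is proved, stated in full; the proofs are below) =====
def Claim_equal_guess_type_from_tags_py : Prop := ∀ (tags : List String), Dom_guess_type_from_tags_py tags → Spec_guess_type_from_tags_py tags (guess_type_from_tags_py tags)

-- ===== LEMMAS AND PROOFS =====

-- rank of a lowered tag: which keyword group it belongs to (none = no group)
def pvRk (s : String) : Option Nat :=
  if s ∈ ["person", "people", "bio", "biography"] then some 0
  else if s ∈ ["book", "paper", "article", "work", "reference"] then some 1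
  else if s ∈ ["place", "location", "city", "country"] then some 2
  else if s ∈ ["event", "meeting", "conference"] then some 3
  else if s ∈ ["project", "system"] then some 4
  else if s ∈ ["org", "organization", "company", "institution"] then some 5
  else none

-- the type string for each rank
def pvEnt : Nat → String
  | 0 => "wh:per" | 1 => "wh:wrk" | 2 => "wh:pla" | 3 => "wh:event" | 4 => "wh:sys" | 5 => "wh:org"
  | _ => "wh:con"

-- min on Option Nat (none = +infinity)
def pvMo : Option Nat → Option Nat → Option Nat
  | none, b => b
  | some a, none => some a
  | some a, some b => some (min a b)

lemma pvGet?_table (s : String) :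
    PySem.Dict.get? pvTypeByKeyword s = (pvRk s).map (fun k => (k, pvEnt k)) := by
  unfold pvRk
  by_cases h0 : s ∈ ["person", "people", "bio", "biography"]
  · fin_cases h0 <;> decide
  by_cases h1 : s ∈ ["book", "paper", "article", "work", "reference"]
  · fin_cases h1 <;> simp_all <;> decide
  by_cases h2 : s ∈ ["place", "location", "city", "country"]
  · fin_cases h2 <;> simp_all <;> decide
  by_cases h3 : s ∈ ["event", "meeting", "conference"]
  · fin_cases h3 <;> simp_all <;> decide
  by_cases h4 : s ∈ ["project", "system"]
  · fin_cases h4 <;> simp_all <;> decide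
  by_cases h5 : s ∈ ["org", "organization", "company", "institution"]
  · fin_cases h5 <;> simp_all <;> decide
  simp only [h0, h1, h2, h3, h4, h5, ite_false, Option.map_none]
  simp only [List.mem_cons, List.not_mem_nil, or_false] at h0 h1 h2 h3 h4 h5
  push Not at h0 h1 h2 h3 h4 h5
  obtain ⟨a1, a2, a3, a4⟩ := h0
  obtain ⟨b1, b2, b3, b4, b5⟩ := h1
  obtain ⟨c1, c2, c3, c4⟩ := h2
  obtain ⟨d1, d2, d3⟩ := h3
  obtain ⟨e1, e2⟩ := h4
  obtain ⟨f1, f2, f3, f4⟩ := h5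
  simp [pvTypeByKeyword, PySem.Dict.get?, Ne.symm a1, Ne.symm a2, Ne.symm a3, Ne.symm a4,
    Ne.symm b1, Ne.symm b2, Ne.symm b3, Ne.symm b4, Ne.symm b5,
    Ne.symm c1, Ne.symm c2, Ne.symm c3, Ne.symm c4,
    Ne.symm d1, Ne.symm d2, Ne.symm d3, Ne.symm e1, Ne.symm e2,
    Ne.symm f1, Ne.symm f2, Ne.symm f3, Ne.symm f4]

-- B's fold, characterised: it computes the minimal rank (as pvMo-fold) decorated with its type
lemma pvFold_char (tags : List String) (a : Option Nat) :
    tags.foldl (fun best t =>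
      match PySem.Dict.get? pvTypeByKeyword (PySem.Str.lower t) with
      | none => best
      | some hit =>
        match best with
        | none => some hit
        | some b => if hit.1 < b.1 then some hit else some b)
      (a.map (fun k => (k, pvEnt k)))
    = ((tags.map (fun t => pvRk (PySem.Str.lower t))).foldl pvMo a).map (fun k => (k, pvEnt k)) := by
  induction tags generalizing a with
  | nil => rfl
  | cons t ts ih =>
    simp only [List.foldl_cons, List.map_cons]
    rw [show (match PySem.Dict.get? pvTypeByKeyword (PySem.Str.lower t) with
      | none => a.map (fun k => (k, pvEnt k))
      | some hit =>
        match a.map (fun k => (k, pvEnt k)) with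
        | none => some hit
        | some b => if hit.1 < b.1 then some hit else some b)
      = (pvMo a (pvRk (PySem.Str.lower t))).map (fun k => (k, pvEnt k)) from ?_]
    · exact ih (pvMo a (pvRk (PySem.Str.lower t)))
    · rw [pvGet?_table]
      cases hr : pvRk (PySem.Str.lower t) with
      | none => cases a <;> rfl
      | some h =>
        cases a with
        | none => rfl
        | some b =>
          simp only [Option.map_some, pvMo]
          by_cases hlt : h < b
          · simp [hlt, Nat.min_eq_left (le_of_lt hlt), min_comm]
          · simp [hlt, Nat.min_eq_left (Nat.le_of_not_lt hlt)]

lemma pvMo_eq_none {a r : Option Nat} : pvMo a r = none ↔ a = none ∧ r = none := by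
  cases a <;> cases r <;> simp [pvMo]

lemma pvFoldl_mo_none (rs : List (Option Nat)) (a : Option Nat) :
    rs.foldl pvMo a = none ↔ a = none ∧ ∀ r ∈ rs, r = none := by
  induction rs generalizing a with
  | nil => simp
  | cons r rs ih =>
    simp only [List.foldl_cons, ih, pvMo_eq_none, List.mem_cons]
    constructor
    · rintro ⟨⟨ha, hr⟩, h⟩
      exact ⟨ha, fun x hx => hx.elim (fun e => e ▸ hr) (h x)⟩
    · rintro ⟨ha, h⟩
      exact ⟨⟨ha, h r (Or.inl rfl)⟩, fun x hx => h x (Or.inr hx)⟩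

lemma pvFoldl_mo_some (rs : List (Option Nat)) (a : Option Nat) (k : Nat)
    (h : rs.foldl pvMo a = some k) :
    (a = some k ∨ some k ∈ rs) ∧ (∀ j, some j ∈ rs → k ≤ j) ∧ (∀ j, a = some j → k ≤ j) := by
  induction rs generalizing a with
  | nil =>
    simp only [List.foldl_nil] at h
    refine ⟨Or.inl h, by simp, fun j hj => ?_⟩
    rw [h] at hj
    injection hj with hkj
    omega
  | cons r rs ih =>
    simp only [List.foldl_cons] at h
    obtain ⟨hmem, hbnd, hacc⟩ := ih (pvMo a r) h
    refine ⟨?_, ?_, ?_⟩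
    · rcases hmem with hm | hm
      · cases a with
        | none =>
          cases r with
          | none => simp [pvMo] at hm
          | some y =>
            simp [pvMo] at hm
            exact Or.inr (by rw [← hm]; exact List.mem_cons_self)
        | some x =>
          cases r with
          | none =>
            simp [pvMo] at hm
            exact Or.inl (by rw [hm])
          | some y =>
            simp [pvMo] at hm
            rcases Nat.le_total x y with hxy | hxy
            · exact Or.inl (by rw [← hm, Nat.min_eq_left hxy])
            · exact Or.inr (by rw [← hm, Nat.min_eq_right hxy]; exact List.mem_cons_self)
      · exact Or.inr (List.mem_cons_of_mem _ hm)
    · intro j hj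
      rcases List.mem_cons.mp hj with hj | hj
      · -- r = some j: k ≤ j since pvMo a r ≤ j and k ≤ pvMo a r
        cases a with
        | none => exact hacc j (by simp [pvMo, ← hj])
        | some x =>
          have := hacc (min x j) (by simp [pvMo, ← hj])
          omega
      · exact hbnd j hj
    · intro j hj
      cases r with
      | none => exact hacc j (by simp [pvMo, hj])
      | some y =>
        have := hacc (min j y) (by simp [pvMo, hj])
        omega

-- A's set-intersection test, characterised as membership of a rank in the lowered-tag ranks
lemma pvCond_iff (tags : List String) (g : List String) (i : Nat)
    (hg : ∀ x, x ∈ g ↔ pvRk x = some i) :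
    (PySem.Set.inter (PySem.Set.ofList (tags.map (fun t => PySem.Str.lower t))) g ≠ []) ↔
      some i ∈ tags.map (fun t => pvRk (PySem.Str.lower t)) := by
  rw [← List.isEmpty_eq_false_iff, List.isEmpty_eq_false_iff_exists_mem]
  simp only [PySem.Set.mem_inter, PySem.Set.mem_ofList, List.mem_map, hg]
  constructor
  · rintro ⟨x, ⟨t, ht, rfl⟩, hr⟩
    exact ⟨t, ht, hr⟩
  · rintro ⟨t, ht, hr⟩
    exact ⟨PySem.Str.lower t, ⟨t, ht, rfl⟩, hr⟩

lemma pvMem_g0 (x : String) : x ∈ (["person", "people", "bio", "biography"] : List String) ↔ pvRk x = some 0 := by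
  constructor
  · intro h; fin_cases h <;> decide
  · intro h; unfold pvRk at h; split_ifs at h <;> simp_all
lemma pvMem_g1 (x : String) : x ∈ (["book", "paper", "article", "work", "reference"] : List String) ↔ pvRk x = some 1 := by
  constructor
  · intro h; fin_cases h <;> decide
  · intro h; unfold pvRk at h; split_ifs at h <;> simp_all
lemma pvMem_g2 (x : String) : x ∈ (["place", "location", "city", "country"] : List String) ↔ pvRk x = some 2 := by
  constructor
  · intro h; fin_cases h <;> decide
  · intro h; unfold pvRk at h; split_ifs at h <;> simp_all
lemma pvMem_g3 (x : String) : x ∈ (["event", "meeting", "conference"] : List String) ↔ pvRk x = some 3 := by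
  constructor
  · intro h; fin_cases h <;> decide
  · intro h; unfold pvRk at h; split_ifs at h <;> simp_all
lemma pvMem_g4 (x : String) : x ∈ (["project", "system"] : List String) ↔ pvRk x = some 4 := by
  constructor
  · intro h; fin_cases h <;> decide
  · intro h; unfold pvRk at h; split_ifs at h <;> simp_all
lemma pvMem_g5 (x : String) : x ∈ (["org", "organization", "company", "institution"] : List String) ↔ pvRk x = some 5 := by
  constructor
  · intro h; fin_cases h <;> decide
  · intro h; unfold pvRk at h; split_ifs at h <;> simp_all

lemma pvRk_le (x : String) (k : Nat) (h : pvRk x = some k) : k ≤ 5 := by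
  unfold pvRk at h
  split_ifs at h <;> injection h with h <;> omega

-- ===== VERDICT (by name: the statement is the Claim_ definition above) =====
theorem guess_type_from_tags_py_spec : Claim_equal_guess_type_from_tags_py := by
  intro tags _
  show guess_type_from_tags_py tags = guess_type_from_tags_py_alt tags
  unfold guess_type_from_tags_py guess_type_from_tags_py_alt
  rw [show (none : Option (Nat × String)) = (none : Option Nat).map (fun k => (k, pvEnt k)) from rfl,
    pvFold_char]
  simp only [pvCond_iff tags _ 0 pvMem_g0, pvCond_iff tags _ 1 pvMem_g1,
    pvCond_iff tags _ 2 pvMem_g2, pvCond_iff tags _ 3 pvMem_g3, pvCond_iff tags _ 4 pvMem_g4,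
    pvCond_iff tags _ 5 pvMem_g5]
  set rs := tags.map (fun t => pvRk (PySem.Str.lower t)) with hrs
  cases hM : rs.foldl pvMo none with
  | none =>
    have hall := (pvFoldl_mo_none rs none).mp hM
    have hno : ∀ i : Nat, ¬ (some i ∈ rs) := by
      intro i hi
      exact Option.some_ne_none i (hall.2 _ hi)
    simp [hno 0, hno 1, hno 2, hno 3, hno 4, hno 5]
  | some k =>
    obtain ⟨hmem, hbnd, -⟩ := pvFoldl_mo_some rs none k hM
    have hkmem : some k ∈ rs := by
      rcases hmem with h | h
      · exact absurd h (by simp)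
      · exact h
    have hk5 : k ≤ 5 := by
      obtain ⟨t, -, hr⟩ := List.mem_map.mp (hrs ▸ hkmem)
      exact pvRk_le _ _ hr
    have hlt : ∀ j, j < k → ¬ (some j ∈ rs) := fun j hj hmem' => by
      have := hbnd j hmem'; omega
    interval_cases k
    · simp [hkmem, pvEnt]
    · simp [hkmem, hlt 0 (by omega), pvEnt]
    · simp [hkmem, hlt 0 (by omega), hlt 1 (by omega), pvEnt]
    · simp [hkmem, hlt 0 (by omega), hlt 1 (by omega), hlt 2 (by omega), pvEnt]
    · simp [hkmem, hlt 0 (by omega), hlt 1 (by omega), hlt 2 (by omega), hlt 3 (by omega), pvEnt]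
    · simp [hkmem, hlt 0 (by omega), hlt 1 (by omega), hlt 2 (by omega), hlt 3 (by omega),
        hlt 4 (by omega), pvEnt]
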